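-- pv_equiv track=rewrite | github.com/linhdvu14/cp-sols | sols/CodeForces/1631_d2/F_Flipping_Range.py | solve
-- ===== SOURCE A (Python) =====
-- def gcd(a, b):
--     '''assume a, b >= 0'''
--     if a < b: a, b = b, a
--     while b > 0: a, b = b, a % b
--     return a
--
-- def solve(N, M, A, B):
--     g = B[0]
--     for b in B: g = gcd(g, b)
--
--     s0 = s1 = 0
--     for i in range(g):
--         v0, v1 = A[i], -A[i]
--         for j in range(i+g, N, g):
--             nv0 = max(v0 + A[j], v1 - A[j])
--             nv1 = max(v0 - A[j], v1 + A[j])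
--             v0, v1 = nv0, nv1
--         s0 += v0
--         s1 += v1
--
--     return max(s0, s1)
-- ===== SOURCE B (Python) =====
-- def _eucl(a, b):
--     """Euclid's algorithm, recursively; assumes nothing (b <= 0 returns a)."""
--     return a if b <= 0 else _eucl(b, a % b)
--
--
-- def solve(N, M, A, B):
--     g = B[0]
--     for b in B:
--         g = _eucl(max(g, b), min(g, b))
--     if g <= 0:
--         return 0
--
--     # one linear pass over indices, bucketing aggregates by residue class mod g
--     S = [abs(A[r]) for r in range(g)]            # sum of magnitudes per class
--     neg = [1 if A[r] < 0 else 0 for r in range(g)]  # count of negatives per class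
--     m = [abs(A[r]) for r in range(g)]            # minimum magnitude per class
--     for k in range(g, N):
--         x = A[k]
--         r = k % g
--         S[r] += abs(x)
--         if x < 0:
--             neg[r] += 1
--         if abs(x) < m[r]:
--             m[r] = abs(x)
--
--     s0 = s1 = 0
--     for r in range(g):
--         keep = S[r]
--         flip = S[r] - 2 * m[r]
--         if neg[r] % 2 == 0:
--             s0 += keep
--             s1 += flip
--         else:
--             s0 += flip
--             s1 += keep
--     return max(s0, s1)
-- ===== Notes on version B (the rewrite author's own statement) =====
-- stated objective: alternative
-- what changed: Replaces the nested per-residue-class 2-state DP loops by a single linear pass over the array that buckets aggregate statistics (sum of magnitudes, negative count, minimum magnitude) into arrays indexed by k mod g, followed by a closed-form parity correction per bucket; the gcd is computed by a recursive Euclid helper instead of the swap-and-while loop.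
import Mathlib
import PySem

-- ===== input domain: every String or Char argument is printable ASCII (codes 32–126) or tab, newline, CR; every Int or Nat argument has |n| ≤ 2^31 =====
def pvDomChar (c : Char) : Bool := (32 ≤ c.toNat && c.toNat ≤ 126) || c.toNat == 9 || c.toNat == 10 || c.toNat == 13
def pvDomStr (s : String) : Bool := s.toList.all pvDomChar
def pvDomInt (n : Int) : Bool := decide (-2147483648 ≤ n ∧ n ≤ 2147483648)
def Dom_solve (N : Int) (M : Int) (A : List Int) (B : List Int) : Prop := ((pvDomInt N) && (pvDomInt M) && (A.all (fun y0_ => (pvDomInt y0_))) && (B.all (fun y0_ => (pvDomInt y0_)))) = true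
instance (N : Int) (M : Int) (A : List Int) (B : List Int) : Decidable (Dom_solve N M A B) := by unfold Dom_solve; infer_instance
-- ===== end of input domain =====

-- B replaces the nested per-class 2-state DP loops by one linear pass bucketing aggregate
-- statistics by residue mod g, plus a closed-form parity correction (alternative algorithm,
-- same asymptotic cost).

-- ===== PORT A =====
-- A's hand-written gcd: swap so a ≥ b, then the while loop 'while b > 0: a, b = b, a % b'
def pyGcdLoop (a b : Int) : Int :=
  if h : 0 < b then pyGcdLoop b (PySem.Int.mod a b) else a
termination_by b.toNat
decreasing_by
  have h1 := PySem.Int.mod_nonneg a h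
  have h2 := PySem.Int.mod_lt a h
  omega

def pyGcd (a b : Int) : Int := if a < b then pyGcdLoop b a else pyGcdLoop a b

-- g = B[0]; for b in B: g = gcd(g, b)   (B[0] guarded by Pre_solve: B ≠ [])
def solve (N : Int) (M : Int) (A : List Int) (B : List Int) : Int :=
  let g := B.foldl pyGcd ((PySem.List.pyGet? B 0).getD 0)
  let p := (PySem.List.pyRange 0 g 1).foldl (fun (s : Int × Int) i =>
      let a := PySem.List.pyGetD A i 0
      let v := (PySem.List.pyRange (i + g) N g).foldl (fun (v : Int × Int) j =>
          let x := PySem.List.pyGetD A j 0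
          (max (v.1 + x) (v.2 - x), max (v.1 - x) (v.2 + x))) (a, -a)
      (s.1 + v.1, s.2 + v.2)) (0, 0)
  max p.1 p.2

-- ===== PORT B =====
-- B's gcd helper: 'a if b <= 0 else _eucl(b, a % b)', called as _eucl(max(g, b), min(g, b))
def euclB (a b : Int) : Int :=
  if h : b ≤ 0 then a else euclB b (PySem.Int.mod a b)
termination_by b.toNat
decreasing_by
  have h1 := PySem.Int.mod_nonneg a (show (0:Int) < b by omega)
  have h2 := PySem.Int.mod_lt a (show (0:Int) < b by omega)
  omega

def solve_alt (N : Int) (M : Int) (A : List Int) (B : List Int) : Int :=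
  let g := B.foldl (fun g b => euclB (max g b) (min g b)) (B.headD 0)
  if g ≤ 0 then 0
  else
    let S0 := (PySem.List.pyRange 0 g 1).map (fun r => |PySem.List.pyGetD A r 0|)
    let neg0 := (PySem.List.pyRange 0 g 1).map (fun r => if PySem.List.pyGetD A r 0 < 0 then (1 : Int) else 0)
    let m0 := (PySem.List.pyRange 0 g 1).map (fun r => |PySem.List.pyGetD A r 0|)
    -- one pass: for k in range(g, N): bucket A[k] into class k % g
    let st := (PySem.List.pyRange g N 1).foldl (fun (st : List Int × List Int × List Int) k =>
        let x := PySem.List.pyGetD A k 0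
        let r := PySem.Int.mod k g
        (PySem.List.pySetD st.1 r (PySem.List.pyGetD st.1 r 0 + |x|),
         if x < 0 then PySem.List.pySetD st.2.1 r (PySem.List.pyGetD st.2.1 r 0 + 1) else st.2.1,
         if |x| < PySem.List.pyGetD st.2.2 r 0 then PySem.List.pySetD st.2.2 r |x| else st.2.2))
      (S0, neg0, m0)
    let p := (PySem.List.pyRange 0 g 1).foldl (fun (s : Int × Int) r =>
        let keep := PySem.List.pyGetD st.1 r 0
        let flip := keep - 2 * PySem.List.pyGetD st.2.2 r 0
        if PySem.Int.mod (PySem.List.pyGetD st.2.1 r 0) 2 = 0 then (s.1 + keep, s.2 + flip)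
        else (s.1 + flip, s.2 + keep))
      (0, 0)
    max p.1 p.2

-- ===== PRECONDITION & SPEC =====
-- gcdPy is a closed form for Python's hand-written gcd(a, b) on arbitrary ints:
-- the true gcd when the smaller (after the swap: second) argument is positive, else the first.
def gcdPy (a b : Int) : Int :=
  if a < b then (if 0 < a then (Int.gcd a b : Int) else b)
  else (if 0 < b then (Int.gcd a b : Int) else a)

def gcdPyOfB (B : List Int) : Int := B.foldl gcdPy (B.headD 0)

-- Exactly the inputs on which the Python A returns: B nonempty (B[0]), and when the
-- gcd g is positive every index A[i] (i < g) and A[j] (j in range(i+g, N, g)) is in range.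
def Pre_solve (N : Int) (M : Int) (A : List Int) (B : List Int) : Prop :=
  B ≠ [] ∧ (0 < gcdPyOfB B →
    gcdPyOfB B ≤ (A.length : Int) ∧ (gcdPyOfB B < N → N ≤ (A.length : Int)))
instance (N : Int) (M : Int) (A : List Int) (B : List Int) : Decidable (Pre_solve N M A B) := by
  unfold Pre_solve; infer_instance

def pvWitness_solve : Int × Int × List Int × List Int := (6, 2, [3, -1, 4, -1, -5, 9], [4, 6])

def Spec_solve (N : Int) (M : Int) (A : List Int) (B : List Int) (out : Int) : Prop := out = solve_alt N M A B
instance (N : Int) (M : Int) (A : List Int) (B : List Int) (out : Int) : Decidable (Spec_solve N M A B out) := by unfold Spec_solve; infer_instance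

-- ===== CLAIM (what is proved, stated in full; the proofs are below) =====
def Claim_equal_solve : Prop := ∀ (N : Int) (M : Int) (A : List Int) (B : List Int), Dom_solve N M A B → Pre_solve N M A B → Spec_solve N M A B (solve N M A B)

-- ===== LEMMAS AND PROOFS =====

-- ---- the two gcd computations agree ----
lemma euclB_eq_loop (a b : Int) : euclB a b = pyGcdLoop a b := by
  rw [euclB, pyGcdLoop]
  split_ifs with h1 h2 h2
  · omega
  · rfl
  · exact euclB_eq_loop b (PySem.Int.mod a b)
  · omega
termination_by b.toNat
decreasing_by
  have h1 := PySem.Int.mod_nonneg a (show (0:Int) < b by omega)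
  have h2 := PySem.Int.mod_lt a (show (0:Int) < b by omega)
  omega

lemma euclB_minmax (a b : Int) : euclB (max a b) (min a b) = pyGcd a b := by
  rw [pyGcd]
  rcases le_or_gt b a with h | h
  · rw [max_eq_left h, min_eq_right h, if_neg (by omega), euclB_eq_loop]
  · rw [max_eq_right (le_of_lt h), min_eq_left (le_of_lt h), if_pos h, euclB_eq_loop]

lemma gcd_folds_eq (B : List Int) :
    B.foldl (fun g b => euclB (max g b) (min g b)) (B.headD 0)
      = B.foldl pyGcd ((PySem.List.pyGet? B 0).getD 0) := by
  have h0 : B.headD 0 = (PySem.List.pyGet? B 0).getD 0 := by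
    cases B with
    | nil => simp [PySem.List.pyGet?]
    | cons x xs => rw [PySem.List.pyGet?_zero_cons]; rfl
  rw [h0]
  exact List.foldl_ext _ _ _ (fun g b _ => euclB_minmax g b)

-- ---- parity-correction closed forms and per-class aggregates ----
def pvF0 (S neg m : Int) : Int := if PySem.Int.mod neg 2 = 0 then S else S - 2 * m
def pvF1 (S neg m : Int) : Int := if PySem.Int.mod neg 2 = 1 then S else S - 2 * m

def aggUpd (t : Int × Int × Int) (x : Int) : Int × Int × Int :=
  (t.1 + |x|, t.2.1 + (if x < 0 then 1 else 0), min t.2.2 |x|)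
def aggInit (a : Int) : Int × Int × Int := (|a|, (if a < 0 then (1 : Int) else 0), |a|)

-- the aggregate triple of the residue class of i (sum of |x|, negatives, min |x|)
def classT (A : List Int) (N G i : Int) : Int × Int × Int :=
  (PySem.List.pyRange (i + G) N G).foldl (fun t j => aggUpd t (PySem.List.pyGetD A j 0))
    (aggInit (PySem.List.pyGetD A i 0))

lemma pv_step_eq (S neg m x : Int) (hm : 0 ≤ m) (hn : 0 ≤ neg) :
    (max (pvF0 S neg m + x) (pvF1 S neg m - x),
     max (pvF0 S neg m - x) (pvF1 S neg m + x)) =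
    (pvF0 (S + |x|) (neg + (if x < 0 then 1 else 0)) (min m |x|),
     pvF1 (S + |x|) (neg + (if x < 0 then 1 else 0)) (min m |x|)) := by
  have h1 : |x| = x ∨ |x| = -x := abs_choice x
  have h2 : 0 ≤ |x| := abs_nonneg x
  have h3 : min m |x| = m ∨ min m |x| = |x| := min_choice m |x|
  have h4 : min m |x| ≤ m := min_le_left m |x|
  have h5 : min m |x| ≤ |x| := min_le_right m |x|
  simp only [pvF0, pvF1, PySem.Int.mod_eq_emod_of_pos (show (0:Int) < 2 by omega),
    Prod.mk.injEq, max_def]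
  rcases h1 with h1 | h1 <;> rcases h3 with h3 | h3 <;>
    refine ⟨?_, ?_⟩ <;> split_ifs <;> omega

lemma pv_init_eq (a : Int) :
    (a, -a) = (pvF0 (aggInit a).1 (aggInit a).2.1 (aggInit a).2.2,
               pvF1 (aggInit a).1 (aggInit a).2.1 (aggInit a).2.2) := by
  have h1 : |a| = a ∨ |a| = -a := abs_choice a
  have h2 : 0 ≤ |a| := abs_nonneg a
  simp only [pvF0, pvF1, aggInit, PySem.Int.mod_eq_emod_of_pos (show (0:Int) < 2 by omega),
    Prod.mk.injEq]
  rcases h1 with h1 | h1 <;> refine ⟨?_, ?_⟩ <;> split_ifs <;> omega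

-- A's 2-state DP fold over a class equals the aggregate fold read through pvF0/pvF1
lemma pv_fold_eq (get : Int → Int) (js : List Int) : ∀ (S neg m : Int), 0 ≤ m → 0 ≤ neg →
    js.foldl (fun (v : Int × Int) j =>
        (max (v.1 + get j) (v.2 - get j), max (v.1 - get j) (v.2 + get j)))
      (pvF0 S neg m, pvF1 S neg m) =
    (let t := js.foldl (fun t j => aggUpd t (get j)) (S, neg, m)
     (pvF0 t.1 t.2.1 t.2.2, pvF1 t.1 t.2.1 t.2.2)) := by
  induction js with
  | nil => intro S neg m _ _; rfl
  | cons j js ih =>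
      intro S neg m hm hn
      simp only [List.foldl_cons]
      rw [show aggUpd (S, neg, m) (get j)
            = (S + |get j|, neg + (if get j < 0 then 1 else 0), min m |get j|) from rfl,
        pv_step_eq S neg m (get j) hm hn,
        ih (S + |get j|) (neg + (if get j < 0 then 1 else 0)) (min m |get j|)
          (le_min hm (abs_nonneg (get j))) (by split_ifs <;> omega)]

-- A's per-class DP value from the aggregates
lemma classA_eq (A : List Int) (N G i : Int) :
    (PySem.List.pyRange (i + G) N G).foldl (fun (v : Int × Int) j =>
        (max (v.1 + PySem.List.pyGetD A j 0) (v.2 - PySem.List.pyGetD A j 0),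
         max (v.1 - PySem.List.pyGetD A j 0) (v.2 + PySem.List.pyGetD A j 0)))
      (PySem.List.pyGetD A i 0, -PySem.List.pyGetD A i 0)
    = (pvF0 (classT A N G i).1 (classT A N G i).2.1 (classT A N G i).2.2,
       pvF1 (classT A N G i).1 (classT A N G i).2.1 (classT A N G i).2.2) := by
  rw [pv_init_eq (PySem.List.pyGetD A i 0)]
  simp only [aggInit]
  rw [pv_fold_eq (fun j => PySem.List.pyGetD A j 0) _ _ _ _ (abs_nonneg _)
    (by split_ifs <;> omega)]
  rfl

-- ---- the filtered index list of a residue class is A's strided range ----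
lemma filter_steprange (g r N : Int) (hg : 0 < g) (h0 : 0 ≤ r) (hrg : r < g) :
    (PySem.List.pyRange g N 1).filter (fun k => decide (PySem.Int.mod k g = r))
      = PySem.List.pyRange (r + g) N g := by
  have hs1 : ((PySem.List.pyRange g N 1).filter
      (fun k => decide (PySem.Int.mod k g = r))).Pairwise (· < ·) :=
    (PySem.List.pairwise_lt_pyRange_one g N).filter _
  have hs2 : (PySem.List.pyRange (r + g) N g).Pairwise (· < ·) := by
    rw [PySem.List.pyRange_of_pos _ _ hg]
    refine List.Pairwise.map _ (fun a b h => ?_) (List.pairwise_lt_range)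
    have : (a : Int) < (b : Int) := by exact_mod_cast h
    nlinarith
  have hmem : ∀ x, x ∈ (PySem.List.pyRange g N 1).filter
        (fun k => decide (PySem.Int.mod k g = r))
      ↔ x ∈ PySem.List.pyRange (r + g) N g := by
    intro x
    rw [List.mem_filter, PySem.List.mem_pyRange_one, PySem.List.mem_pyRange_iff_of_pos hg]
    simp only [decide_eq_true_eq]
    rw [PySem.Int.mod_eq_emod_of_pos hg]
    have hrr : r % g = r := Int.emod_eq_of_lt h0 hrg
    constructor
    · rintro ⟨⟨hgx, hxN⟩, hm⟩
      have hdvd : g ∣ x - r := Int.dvd_of_emod_eq_zero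
        (Int.emod_eq_emod_iff_emod_sub_eq_zero.mp (by omega))
      refine ⟨?_, hxN, ?_⟩
      · have := Int.le_of_dvd (by omega) hdvd
        omega
      · have he : x - (r + g) = (x - r) - g := by ring
        rw [he]
        exact dvd_sub hdvd (dvd_refl g)
    · rintro ⟨hge, hxN, hdvd⟩
      have hdvd' : g ∣ x - r := by
        have he : x - r = (x - (r + g)) + g := by ring
        rw [he]; exact dvd_add hdvd (dvd_refl g)
      refine ⟨⟨by omega, hxN⟩, ?_⟩
      have := Int.emod_eq_emod_iff_emod_sub_eq_zero.mpr (Int.emod_eq_zero_of_dvd hdvd')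
      omega
  have hperm := List.perm_of_nodup_nodup_toFinset_eq
      (hs1.imp ne_of_lt) (hs2.imp ne_of_lt)
      (Finset.ext (fun x => by simp only [List.mem_toFinset]; exact hmem x))
  exact List.Perm.eq_of_pairwise (fun a b _ _ h1 h2 => by omega) hs1 hs2 hperm

-- ---- B's single pass: buckets hold the class aggregates ----
-- the loop body of B's linear pass (proof-side name; definitionally the lambda in solve_alt)
def stepB (A : List Int) (g : Int) (st : List Int × List Int × List Int) (k : Int) :
    List Int × List Int × List Int :=
  let x := PySem.List.pyGetD A k 0
  let q := PySem.Int.mod k g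
  (PySem.List.pySetD st.1 q (PySem.List.pyGetD st.1 q 0 + |x|),
   if x < 0 then PySem.List.pySetD st.2.1 q (PySem.List.pyGetD st.2.1 q 0 + 1) else st.2.1,
   if |x| < PySem.List.pyGetD st.2.2 q 0 then PySem.List.pySetD st.2.2 q |x| else st.2.2)

def bucket (st : List Int × List Int × List Int) (r : Int) : Int × Int × Int :=
  (PySem.List.pyGetD st.1 r 0, PySem.List.pyGetD st.2.1 r 0, PySem.List.pyGetD st.2.2 r 0)

lemma stepB_len (A : List Int) (g : Int) (hg : 0 < g) (st : List Int × List Int × List Int)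
    (k : Int) :
    (stepB A g st k).1.length = st.1.length ∧ (stepB A g st k).2.1.length = st.2.1.length ∧
      (stepB A g st k).2.2.length = st.2.2.length := by
  have hq0 : 0 ≤ PySem.Int.mod k g := PySem.Int.mod_nonneg k hg
  obtain ⟨qn, hq⟩ : ∃ qn : Nat, (qn : Int) = PySem.Int.mod k g :=
    ⟨_, Int.toNat_of_nonneg hq0⟩
  simp only [stepB, ← hq, PySem.List.pySetD_natCast]
  refine ⟨List.length_set .., ?_, ?_⟩ <;> split <;>
    first | exact List.length_set .. | rfl

lemma stepB_bucket (A : List Int) (g : Int) (hg : 0 < g) (st : List Int × List Int × List Int)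
    (hl1 : st.1.length = g.toNat) (hl2 : st.2.1.length = g.toNat)
    (hl3 : st.2.2.length = g.toNat) (k r : Int) (hr0 : 0 ≤ r) (hrg : r < g) :
    bucket (stepB A g st k) r =
      if PySem.Int.mod k g = r then aggUpd (bucket st r) (PySem.List.pyGetD A k 0)
      else bucket st r := by
  have hq0 : 0 ≤ PySem.Int.mod k g := PySem.Int.mod_nonneg k hg
  have hqg : PySem.Int.mod k g < g := PySem.Int.mod_lt k hg
  obtain ⟨qn, hq⟩ : ∃ qn : Nat, (qn : Int) = PySem.Int.mod k g :=
    ⟨_, Int.toNat_of_nonneg hq0⟩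
  obtain ⟨rn, hr⟩ : ∃ rn : Nat, (rn : Int) = r := ⟨_, Int.toNat_of_nonneg hr0⟩
  have hq1 : qn < st.1.length := by omega
  have hq2 : qn < st.2.1.length := by omega
  have hq3 : qn < st.2.2.length := by omega
  simp only [stepB, bucket, aggUpd, ← hq, ← hr]
  by_cases hqr : rn = qn
  · subst hqr
    rw [if_pos rfl, PySem.List.pyGetD_pySetD_natCast _ _ _ _ _ hq1, if_pos rfl,
      Prod.mk.injEq, Prod.mk.injEq]
    refine ⟨rfl, ?_, ?_⟩
    · split_ifs with h
      · rw [PySem.List.pyGetD_pySetD_natCast _ _ _ _ _ hq2, if_pos rfl]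
      · omega
    · split_ifs with h
      · rw [PySem.List.pyGetD_pySetD_natCast _ _ _ _ _ hq3, if_pos rfl]
        omega
      · omega
  · rw [if_neg (show ¬((qn : Int) = (rn : Int)) by
        intro h; exact hqr (by exact_mod_cast h.symm)),
      PySem.List.pyGetD_pySetD_natCast _ _ _ _ _ hq1, if_neg hqr,
      Prod.mk.injEq, Prod.mk.injEq]
    refine ⟨rfl, ?_, ?_⟩
    · split_ifs with h
      · rw [PySem.List.pyGetD_pySetD_natCast _ _ _ _ _ hq2, if_neg hqr]
      · rfl
    · split_ifs with h
      · rw [PySem.List.pyGetD_pySetD_natCast _ _ _ _ _ hq3, if_neg hqr]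
      · rfl

lemma bucket_fold (A : List Int) (g : Int) (hg : 0 < g) (L : List Int) :
    ∀ (st : List Int × List Int × List Int),
      st.1.length = g.toNat → st.2.1.length = g.toNat → st.2.2.length = g.toNat →
      ∀ r : Int, 0 ≤ r → r < g →
        bucket (L.foldl (stepB A g) st) r
          = ((L.filter (fun k => decide (PySem.Int.mod k g = r))).map
                (fun j => PySem.List.pyGetD A j 0)).foldl aggUpd (bucket st r) := by
  induction L with
  | nil => intro st _ _ _ r _ _; rfl
  | cons k L ih =>
      intro st hl1 hl2 hl3 r hr0 hrg
      obtain ⟨e1, e2, e3⟩ := stepB_len A g hg st k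
      simp only [List.foldl_cons, List.filter_cons]
      rw [ih (stepB A g st k) (by omega) (by omega) (by omega) r hr0 hrg,
        stepB_bucket A g hg st hl1 hl2 hl3 k r hr0 hrg]
      by_cases hqr : PySem.Int.mod k g = r
      · rw [if_pos hqr, if_pos (by simpa using hqr), List.map_cons, List.foldl_cons]
      · rw [if_neg hqr, if_neg (by simpa using hqr)]

-- ===== VERDICT (by name: the statement is the Claim_ definition above) =====
theorem solve_spec : Claim_equal_solve := by
  intro N M A B _ _
  unfold Spec_solve
  simp only [solve, solve_alt, gcd_folds_eq]
  set G := B.foldl pyGcd ((PySem.List.pyGet? B 0).getD 0)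
  by_cases hG : G ≤ 0
  · rw [if_pos hG, PySem.List.pyRange_one_eq_nil hG]
    rfl
  · replace hG : (0:Int) < G := by omega
    rw [if_neg (by omega)]
    rw [show (fun (st : List Int × List Int × List Int) (k : Int) =>
        (PySem.List.pySetD st.1 (PySem.Int.mod k G)
            (PySem.List.pyGetD st.1 (PySem.Int.mod k G) 0 + |PySem.List.pyGetD A k 0|),
         if PySem.List.pyGetD A k 0 < 0 then
           PySem.List.pySetD st.2.1 (PySem.Int.mod k G)
             (PySem.List.pyGetD st.2.1 (PySem.Int.mod k G) 0 + 1)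
         else st.2.1,
         if |PySem.List.pyGetD A k 0| < PySem.List.pyGetD st.2.2 (PySem.Int.mod k G) 0 then
           PySem.List.pySetD st.2.2 (PySem.Int.mod k G) |PySem.List.pyGetD A k 0|
         else st.2.2)) = stepB A G from rfl]
    set ST := List.foldl (stepB A G)
      ((PySem.List.pyRange 0 G 1).map (fun r => |PySem.List.pyGetD A r 0|),
       (PySem.List.pyRange 0 G 1).map (fun r => if PySem.List.pyGetD A r 0 < 0 then (1 : Int) else 0),
       (PySem.List.pyRange 0 G 1).map (fun r => |PySem.List.pyGetD A r 0|))
      (PySem.List.pyRange G N 1) with hST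
    have hlen : ((PySem.List.pyRange 0 G 1).map
        (fun r => |PySem.List.pyGetD A r 0|)).length = G.toNat := by
      rw [List.length_map, PySem.List.length_pyRange_one]; omega
    have hlen2 : ((PySem.List.pyRange 0 G 1).map
        (fun r => if PySem.List.pyGetD A r 0 < 0 then (1 : Int) else 0)).length = G.toNat := by
      rw [List.length_map, PySem.List.length_pyRange_one]; omega
    have hbuck : ∀ r : Int, 0 ≤ r → r < G → bucket ST r = classT A N G r := by
      intro r hr0 hrG
      rw [hST, bucket_fold A G hG _ _ hlen hlen2 hlen r hr0 hrG,
        filter_steprange G r N hG hr0 hrG]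
      have hinit : bucket
          ((PySem.List.pyRange 0 G 1).map (fun r => |PySem.List.pyGetD A r 0|),
           (PySem.List.pyRange 0 G 1).map (fun r => if PySem.List.pyGetD A r 0 < 0 then (1 : Int) else 0),
           (PySem.List.pyRange 0 G 1).map (fun r => |PySem.List.pyGetD A r 0|)) r
          = aggInit (PySem.List.pyGetD A r 0) := by
        simp only [bucket, aggInit]
        rw [PySem.List.pyGetD_map_pyRange_of_nonneg _ _ _ _ hr0 hrG,
          PySem.List.pyGetD_map_pyRange_of_nonneg _ _ _ _ hr0 hrG]
      rw [hinit, List.foldl_map, classT]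
    have hA : ∀ (s : Int × Int) (i : Int), i ∈ PySem.List.pyRange 0 G 1 →
        (fun (s : Int × Int) i =>
          (s.1 + ((PySem.List.pyRange (i + G) N G).foldl (fun (v : Int × Int) j =>
              (max (v.1 + PySem.List.pyGetD A j 0) (v.2 - PySem.List.pyGetD A j 0),
               max (v.1 - PySem.List.pyGetD A j 0) (v.2 + PySem.List.pyGetD A j 0)))
            (PySem.List.pyGetD A i 0, -PySem.List.pyGetD A i 0)).1,
           s.2 + ((PySem.List.pyRange (i + G) N G).foldl (fun (v : Int × Int) j =>
              (max (v.1 + PySem.List.pyGetD A j 0) (v.2 - PySem.List.pyGetD A j 0),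
               max (v.1 - PySem.List.pyGetD A j 0) (v.2 + PySem.List.pyGetD A j 0)))
            (PySem.List.pyGetD A i 0, -PySem.List.pyGetD A i 0)).2)) s i
        = (s.1 + pvF0 (classT A N G i).1 (classT A N G i).2.1 (classT A N G i).2.2,
           s.2 + pvF1 (classT A N G i).1 (classT A N G i).2.1 (classT A N G i).2.2) := by
      intro s i _
      simp only
      rw [classA_eq A N G i]
    have hB : ∀ (s : Int × Int) (r : Int), r ∈ PySem.List.pyRange 0 G 1 →
        (fun (s : Int × Int) r =>
          if PySem.Int.mod (PySem.List.pyGetD ST.2.1 r 0) 2 = 0 then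
            (s.1 + PySem.List.pyGetD ST.1 r 0,
             s.2 + (PySem.List.pyGetD ST.1 r 0 - 2 * PySem.List.pyGetD ST.2.2 r 0))
          else
            (s.1 + (PySem.List.pyGetD ST.1 r 0 - 2 * PySem.List.pyGetD ST.2.2 r 0),
             s.2 + PySem.List.pyGetD ST.1 r 0)) s r
        = (s.1 + pvF0 (classT A N G r).1 (classT A N G r).2.1 (classT A N G r).2.2,
           s.2 + pvF1 (classT A N G r).1 (classT A N G r).2.1 (classT A N G r).2.2) := by
      intro s r hmem
      rw [PySem.List.mem_pyRange_one] at hmem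
      have hb := hbuck r hmem.1 hmem.2
      have h1 : PySem.List.pyGetD ST.1 r 0 = (classT A N G r).1 := congrArg Prod.fst hb
      have h2 : PySem.List.pyGetD ST.2.1 r 0 = (classT A N G r).2.1 :=
        congrArg (fun t => t.2.1) hb
      have h3 : PySem.List.pyGetD ST.2.2 r 0 = (classT A N G r).2.2 :=
        congrArg (fun t => t.2.2) hb
      simp only [h1, h2, h3, pvF0, pvF1]
      rcases PySem.Int.mod_two_eq (classT A N G r).2.1 with h | h
      · rw [if_pos h, if_pos h, if_neg (by omega)]
      · rw [if_neg (by omega), if_neg (by omega), if_pos h]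
    rw [PySem.List.foldl_congr_mem (PySem.List.pyRange 0 G 1)
        (fun (s : Int × Int) i =>
          (s.1 + ((PySem.List.pyRange (i + G) N G).foldl (fun (v : Int × Int) j =>
              (max (v.1 + PySem.List.pyGetD A j 0) (v.2 - PySem.List.pyGetD A j 0),
               max (v.1 - PySem.List.pyGetD A j 0) (v.2 + PySem.List.pyGetD A j 0)))
            (PySem.List.pyGetD A i 0, -PySem.List.pyGetD A i 0)).1,
           s.2 + ((PySem.List.pyRange (i + G) N G).foldl (fun (v : Int × Int) j =>
              (max (v.1 + PySem.List.pyGetD A j 0) (v.2 - PySem.List.pyGetD A j 0),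
               max (v.1 - PySem.List.pyGetD A j 0) (v.2 + PySem.List.pyGetD A j 0)))
            (PySem.List.pyGetD A i 0, -PySem.List.pyGetD A i 0)).2))
        (fun (s : Int × Int) i =>
          (s.1 + pvF0 (classT A N G i).1 (classT A N G i).2.1 (classT A N G i).2.2,
           s.2 + pvF1 (classT A N G i).1 (classT A N G i).2.1 (classT A N G i).2.2))
        (0, 0) hA,
      PySem.List.foldl_congr_mem (PySem.List.pyRange 0 G 1)
        (fun (s : Int × Int) r =>
          if PySem.Int.mod (PySem.List.pyGetD ST.2.1 r 0) 2 = 0 then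
            (s.1 + PySem.List.pyGetD ST.1 r 0,
             s.2 + (PySem.List.pyGetD ST.1 r 0 - 2 * PySem.List.pyGetD ST.2.2 r 0))
          else
            (s.1 + (PySem.List.pyGetD ST.1 r 0 - 2 * PySem.List.pyGetD ST.2.2 r 0),
             s.2 + PySem.List.pyGetD ST.1 r 0))
        (fun (s : Int × Int) r =>
          (s.1 + pvF0 (classT A N G r).1 (classT A N G r).2.1 (classT A N G r).2.2,
           s.2 + pvF1 (classT A N G r).1 (classT A N G r).2.1 (classT A N G r).2.2))
        (0, 0) hB]
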